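-- pv_equiv track=rewrite | github.com/clemvg/AdventOfCode | tasks/day_3_the_lobby.py | max_bank_joltage
-- ===== SOURCE A (Python) =====
-- def max_bank_joltage(bank: int) -> int:
--     """
--     Given a bank represented as an integer (digits 1-9), find the maximum two-digit
--     number formed by selecting two digits in their original order.
--     """
--     # TODO: make more generalizable to n-digit numbers, recursive ?
--     s = str(bank)
--     if len(s) < 2:
--         raise ValueError("Bank must have at least two digits.")
--
--     # keep track the maximum first digit seen so far (from the left), then for each position j
--     # form a two-digit number with that max-first-digit and s[j]
--     # better approach than just keeping track of the max digit betwen 1 and 9, as this logic can be generalized: multiple for loops and 10^n multipliers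
--     # nevertheless more a brute force approach, more co,binatiosn are tested
--     best_tens_so_far = int(s[0])
--     best_two_digit_so_far = 0
--
--     for j in range(1, len(s)):
--         second_number = int(s[j])
--         candidate = 10 * best_tens_so_far + second_number
--         if candidate > best_two_digit_so_far:
--             best_two_digit_so_far = candidate
--         # Update best_tens_so_far with the best prefix digit seen so far
--         if second_number > best_tens_so_far:
--             # second_number is at position j, but it can't pair with itself for this j;
--             # still, it becomes the prefix max for future positions.
--             best_tens_so_far = second_number
--
--     return best_two_digit_so_far
-- ===== SOURCE B (Python) =====
-- def _pair_candidates(digits):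
--     # all two-digit numbers 10*digits[i] + digits[j] with i < j, by recursion on the list
--     if not digits:
--         return []
--     first, rest = digits[0], digits[1:]
--     return [10 * first + y for y in rest] + _pair_candidates(rest)
--
--
-- def max_bank_joltage(bank: int) -> int:
--     s = str(bank)
--     if len(s) < 2:
--         raise ValueError("Bank must have at least two digits.")
--     digits = [int(c) for c in s]
--     return max(_pair_candidates(digits))
-- ===== Notes on version B (the rewrite author's own statement) =====
-- stated objective: alternative
-- what changed: Replaces A's single left-to-right pass carrying a running best-tens-digit and running best with an explicit recursive enumeration of all ordered digit pairs followed by one max over the candidate list.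
import Mathlib
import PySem

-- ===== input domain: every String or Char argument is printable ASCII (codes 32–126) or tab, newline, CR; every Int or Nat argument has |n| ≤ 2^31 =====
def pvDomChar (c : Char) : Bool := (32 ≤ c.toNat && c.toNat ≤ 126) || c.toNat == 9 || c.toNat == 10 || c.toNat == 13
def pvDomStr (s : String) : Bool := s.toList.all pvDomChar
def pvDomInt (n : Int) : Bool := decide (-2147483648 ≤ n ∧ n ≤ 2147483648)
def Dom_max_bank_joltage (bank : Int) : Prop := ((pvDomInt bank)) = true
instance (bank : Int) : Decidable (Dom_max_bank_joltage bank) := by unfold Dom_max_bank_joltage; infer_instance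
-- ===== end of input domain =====

-- B replaces A's single running-best pass with an explicit recursive enumeration of all
-- ordered digit pairs followed by one max (objective: alternative algorithm, same result).

-- shared primitive: int(c) for one character c (Python's int() on a 1-char string)
def pvCharInt (c : Char) : Int := (PySem.Int.ofChars? [c]).getD 0

-- ===== PORT A =====
def max_bank_joltage (bank : Int) : Int :=
  match PySem.Int.toChars bank with
  | c0 :: c1 :: rest =>
      -- best_tens_so_far = int(s[0]); best_two_digit_so_far = 0; for j in range(1, len(s)): …
      (((c1 :: rest).foldl (fun (st : Int × Int) c =>
          let second := pvCharInt c
          let candidate := 10 * st.1 + second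
          let best := if candidate > st.2 then candidate else st.2
          let tens := if second > st.1 then second else st.1
          (tens, best)) (pvCharInt c0, 0))).2
  | _ => 0  -- len(s) < 2: Python raises ValueError here (excluded by Pre_)

-- ===== PORT B =====
def pvPairCands : List Int → List Int
  | [] => []
  | x :: rest => rest.map (fun y => 10 * x + y) ++ pvPairCands rest

def max_bank_joltage_alt (bank : Int) : Int :=
  let s := PySem.Int.toChars bank
  if s.length < 2 then 0  -- Python raises ValueError here (excluded by Pre_)
  else
    let digits := s.map pvCharInt
    (PySem.List.max? (pvPairCands digits) (fun y => y)).getD 0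

-- ===== PRECONDITION & SPEC =====
-- Pre_ excludes exactly the inputs where the Python A raises ValueError: bank < 10 means
-- str(bank) is a single digit (the len < 2 guard) or starts with '-' (int('-') fails).
def Pre_max_bank_joltage (bank : Int) : Prop := 10 ≤ bank
instance (bank : Int) : Decidable (Pre_max_bank_joltage bank) := by unfold Pre_max_bank_joltage; infer_instance
def pvWitness_max_bank_joltage : Int := 12

def Spec_max_bank_joltage (bank : Int) (out : Int) : Prop := out = max_bank_joltage_alt bank
instance (bank : Int) (out : Int) : Decidable (Spec_max_bank_joltage bank out) := by unfold Spec_max_bank_joltage; infer_instance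

-- ===== CLAIM (what is proved, stated in full; the proofs are below) =====
def Claim_equal_max_bank_joltage : Prop := ∀ (bank : Int), Dom_max_bank_joltage bank → Pre_max_bank_joltage bank → Spec_max_bank_joltage bank (max_bank_joltage bank)

-- ===== LEMMAS AND PROOFS =====

theorem pv_bind_nat_nonneg (o : Option Nat) :
    0 ≤ ((do let a ← o; pure ((a : Int))).map (fun n => n)).getD 0 := by
  cases o <;> simp

theorem pvCharInt_nonneg (c : Char) : 0 ≤ pvCharInt c := by
  unfold pvCharInt PySem.Int.ofChars?
  by_cases hs : PySem.Int.isIntSpace c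
  · simp only [List.dropWhile, hs, List.reverse_nil]
    exact pv_bind_nat_nonneg _
  · simp only [List.dropWhile, hs, List.reverse_cons,
      List.reverse_nil, List.nil_append]
    by_cases h1 : c = '-'
    · subst h1; decide
    · by_cases h2 : c = '+'
      · subst h2; decide
      · split
        · next h => exact absurd (List.cons_eq_cons.mp h).1 h1
        · next h => exact absurd (List.cons_eq_cons.mp h).1 h2
        · exact pv_bind_nat_nonneg _

-- proof-side mirror of A's running state: candidate list with the prefix max threaded through
def pvCA : Int → List Int → List Int
  | _, [] => []
  | t, x :: xs => (10 * t + x) :: pvCA (max t x) xs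

theorem pv_foldl_max_shift (l : List Int) : ∀ a b : Int,
    l.foldl max (max a b) = max (l.foldl max a) b := by
  induction l with
  | nil => intro a b; rfl
  | cons x xs ih =>
      intro a b
      simpa [List.foldl, max_assoc, max_comm b x] using ih (max a x) b

-- max over a list of (nonnegative) candidates, with 0 as identity
def pvM (l : List Int) : Int := l.foldl max 0

theorem pvM_nonneg (l : List Int) : 0 ≤ pvM l := (PySem.List.le_foldl_max l 0).1

theorem pvM_cons (a : Int) (l : List Int) : pvM (a :: l) = max a (pvM l) := by
  unfold pvM
  simp only [List.foldl]
  rw [pv_foldl_max_shift l 0 a, max_comm]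

theorem pvM_append (l1 l2 : List Int) : pvM (l1 ++ l2) = max (pvM l1) (pvM l2) := by
  induction l1 with
  | nil =>
      rw [List.nil_append, show pvM ([] : List Int) = 0 from rfl]
      have := pvM_nonneg l2
      omega
  | cons x xs ih => simp [pvM_cons, ih, max_assoc]

theorem pvM_map_mono (a b : Int) (hab : a ≤ b) : ∀ (l : List Int),
    pvM (l.map (fun y => 10 * a + y)) ≤ pvM (l.map (fun y => 10 * b + y)) := by
  intro l
  induction l with
  | nil => simp
  | cons z zs ih => simp only [List.map, pvM_cons]; omega

theorem pv_foldl_eq_pvM_cons (l : List Int) (c : Int) (hc : 0 ≤ c) :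
    l.foldl max c = pvM (c :: l) := by
  have h := pv_foldl_max_shift l 0 c
  rw [max_eq_right hc] at h
  rw [h, pvM_cons, pvM, max_comm]

-- A's loop over the remaining characters computes the running max of pvCA's candidates
theorem pv_loop_eq (xs : List Char) : ∀ (t b : Int),
    (xs.foldl (fun (st : Int × Int) c =>
        let second := pvCharInt c
        let candidate := 10 * st.1 + second
        let best := if candidate > st.2 then candidate else st.2
        let tens := if second > st.1 then second else st.1
        (tens, best)) (t, b)).2 = (pvCA t (xs.map pvCharInt)).foldl max b := by
  induction xs with
  | nil => intro t b; rfl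
  | cons c cs ih =>
      intro t b
      have h1 : (if pvCharInt c > t then pvCharInt c else t) = max t (pvCharInt c) := by
        rcases max_cases t (pvCharInt c) with ⟨h, _⟩ | ⟨h, _⟩ <;> rw [h] <;> split <;> omega
      have h2 : (if 10 * t + pvCharInt c > b then 10 * t + pvCharInt c else b)
          = max b (10 * t + pvCharInt c) := by
        rcases max_cases b (10 * t + pvCharInt c) with ⟨h, _⟩ | ⟨h, _⟩ <;> rw [h] <;> split <;> omega
      simp only [List.foldl, List.map, pvCA]
      rw [h1, h2]
      exact ih _ _

-- the prefix-max candidates and the all-pairs candidates have the same max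
theorem pv_cA_eq_pairs (xs : List Int) : ∀ t : Int,
    pvM (pvCA t xs) = max (pvM (xs.map (fun y => 10 * t + y))) (pvM (pvPairCands xs)) := by
  induction xs with
  | nil => intro t; simp [pvCA, pvPairCands, pvM]
  | cons x ys ih =>
      intro t
      simp only [pvCA, List.map, pvPairCands, pvM_cons, pvM_append, ih (max t x)]
      rcases max_cases t x with ⟨hm, hle⟩ | ⟨hm, hlt⟩
      · rw [hm]
        have := pvM_map_mono x t hle ys
        omega
      · rw [hm]
        have := pvM_map_mono t x (le_of_lt hlt) ys
        omega

-- ===== VERDICT (by name: the statement is the Claim_ definition above) =====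
theorem max_bank_joltage_spec : Claim_equal_max_bank_joltage := by
  intro bank _hdom _hpre
  unfold Spec_max_bank_joltage max_bank_joltage max_bank_joltage_alt
  rcases hs : PySem.Int.toChars bank with _ | ⟨c0, _ | ⟨c1, rest⟩⟩
  · simp
  · simp
  · simp only [List.length_cons, List.map_cons]
    rw [if_neg (by omega)]
    have h0 : (0:Int) ≤ 10 * pvCharInt c0 + pvCharInt c1 := by
      have := pvCharInt_nonneg c0; have := pvCharInt_nonneg c1; omega
    rw [show pvPairCands (pvCharInt c0 :: pvCharInt c1 :: rest.map pvCharInt)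
        = (10 * pvCharInt c0 + pvCharInt c1) ::
          ((rest.map pvCharInt).map (fun y => 10 * pvCharInt c0 + y) ++
            pvPairCands (pvCharInt c1 :: rest.map pvCharInt)) from by simp [pvPairCands]]
    rw [PySem.List.max?_id_cons, Option.getD_some]
    rw [pv_loop_eq, pv_foldl_eq_pvM_cons _ _ h0]
    show pvM (pvCA (pvCharInt c0) ((c1 :: rest).map pvCharInt)) = _
    rw [pv_cA_eq_pairs]
    simp only [List.map_cons, pvM_cons, pvM_append]
    omega
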